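-- pv_equiv track=rewrite | github.com/riccardogibello/sht5_hier_gen | src/architectures/baseline_t5/metrics/constrained_f1.py | _constrained_output_with_respect_to_hierarchy
-- ===== SOURCE A (Python) =====
-- def _constrained_output_with_respect_to_hierarchy(
--     child_parent_indexes: dict[int, int], predicted_m_hot_vector: list[int]
-- ) -> list[int]:
--     """
--     Clean the predicted multi-hot vector based on the hierarchy.
--
--     :param child_parent_indexes: A map in which each key is the index of a child label and the value is the index of
--     the parent label.
--     :param predicted_m_hot_vector: The predicted multi-hot vector.
--
--     :return: A cleaned multi-hot vector, in which labels which are predicted as positive but their parent is not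
--     predicted as positive are removed.
--     """
--     # Build a constrained multi-hot vector based on the hierarchy
--     constrained_predicted_m_hot_vector = [0 for _ in range(len(predicted_m_hot_vector))]
--     # For each possible label index
--     for l_index in range(len(predicted_m_hot_vector)):
--         # If the label is predicted as positive
--         if predicted_m_hot_vector[l_index] >= 0.5:
--             # If the label has a parent label
--             if l_index in child_parent_indexes.keys():
--                 # If the parent label is also predicted as positive
--                 if predicted_m_hot_vector[child_parent_indexes[l_index]] >= 0.5:
--                     # Then the label is also predicted as positive
--                     constrained_predicted_m_hot_vector[l_index] = 1
--                 else:
--                     # Remove the label as positive and leave it as negative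
--                     pass
--             else:
--                 # Keep the label as positive
--                 constrained_predicted_m_hot_vector[l_index] = 1
--         else:
--             # Keep the label as negative
--             pass
--     # Return the cleaned multi-hot vector, in which labels which are predicted as positive but their parent is not
--     # predicted as positive are removed
--     return constrained_predicted_m_hot_vector
-- ===== SOURCE B (Python) =====
-- def _constrained_output_with_respect_to_hierarchy(
--     child_parent_indexes: dict[int, int], predicted_m_hot_vector: list[int]
-- ) -> list[int]:
--     n = len(predicted_m_hot_vector)
--     # first pass: plain thresholding
--     out = [1 if v >= 0.5 else 0 for v in predicted_m_hot_vector]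
--     # second pass: zero out children whose parent is not predicted positive
--     for child, parent in child_parent_indexes.items():
--         if 0 <= child < n and out[child] == 1 and predicted_m_hot_vector[parent] < 0.5:
--             out[child] = 0
--     return out
-- ===== Notes on version B (the rewrite author's own statement) =====
-- stated objective: simpler
-- what changed: A scans every vector index and does a dict membership test plus lookup per positive index; B thresholds the vector in one comprehension and then iterates the dict items once, zeroing children whose parent is below threshold.
import Mathlib
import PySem

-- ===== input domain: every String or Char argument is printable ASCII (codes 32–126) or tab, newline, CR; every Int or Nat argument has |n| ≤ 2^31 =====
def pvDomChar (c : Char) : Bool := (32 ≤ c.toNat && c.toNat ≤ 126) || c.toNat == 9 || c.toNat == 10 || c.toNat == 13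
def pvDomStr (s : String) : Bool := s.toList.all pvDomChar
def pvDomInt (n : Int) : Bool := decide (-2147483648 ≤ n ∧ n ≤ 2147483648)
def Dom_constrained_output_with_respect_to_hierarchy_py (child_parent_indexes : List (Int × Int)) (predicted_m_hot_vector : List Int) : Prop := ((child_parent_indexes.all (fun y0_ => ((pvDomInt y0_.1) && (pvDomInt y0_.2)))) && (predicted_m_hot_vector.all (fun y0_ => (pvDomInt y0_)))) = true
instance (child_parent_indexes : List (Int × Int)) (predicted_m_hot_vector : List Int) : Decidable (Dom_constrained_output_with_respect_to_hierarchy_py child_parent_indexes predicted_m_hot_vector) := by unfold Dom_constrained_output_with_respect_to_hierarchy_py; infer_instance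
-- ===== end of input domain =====

-- B replaces A's per-index dict membership test + lookup by a one-comprehension threshold pass
-- followed by a single pass over the dict items that zeroes children with a sub-threshold parent
-- (simpler decomposition, same asymptotic cost).

-- ===== PORT A =====
-- the vector holds ints, so Python's 'x >= 0.5' is exactly '1 ≤ x' and 'x < 0.5' is 'x < 1'
def constrained_output_with_respect_to_hierarchy_py (child_parent_indexes : List (Int × Int)) (predicted_m_hot_vector : List Int) : List Int :=
  (PySem.List.pyRange 0 (predicted_m_hot_vector.length : Int) 1).foldl
    (fun out l_index =>
      if 1 ≤ PySem.List.pyGetD predicted_m_hot_vector l_index 0 then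
        if (PySem.Dict.mk child_parent_indexes).contains l_index then
          -- 'child_parent_indexes[l_index]' is guarded by the contains check, so getD is exact
          if 1 ≤ PySem.List.pyGetD predicted_m_hot_vector ((PySem.Dict.mk child_parent_indexes).getD l_index 0) 0 then
            PySem.List.pySetD out l_index 1
          else out
        else PySem.List.pySetD out l_index 1
      else out)
    ((PySem.List.pyRange 0 (predicted_m_hot_vector.length : Int) 1).map (fun _ => (0 : Int)))

-- ===== PORT B =====
def constrained_output_with_respect_to_hierarchy_py_alt (child_parent_indexes : List (Int × Int)) (predicted_m_hot_vector : List Int) : List Int :=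
  child_parent_indexes.foldl
    (fun out cp =>
      if 0 ≤ cp.1 ∧ cp.1 < (predicted_m_hot_vector.length : Int) then
        if PySem.List.pyGetD out cp.1 0 = 1 then
          if PySem.List.pyGetD predicted_m_hot_vector cp.2 0 < 1 then
            PySem.List.pySetD out cp.1 0
          else out
        else out
      else out)
    (predicted_m_hot_vector.map (fun x => if 1 ≤ x then (1 : Int) else 0))

-- ===== PRECONDITION & SPEC =====
-- The Nodup conjunct only states the dict representation invariant (a Python dict cannot hold the
-- same child key twice); the second conjunct excludes exactly the inputs where Python A (and B)
-- raise IndexError reading predicted_m_hot_vector[parent] for a positively-predicted child.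
def Pre_constrained_output_with_respect_to_hierarchy_py (child_parent_indexes : List (Int × Int)) (predicted_m_hot_vector : List Int) : Prop :=
  (child_parent_indexes.map Prod.fst).Nodup ∧
  ∀ cp ∈ child_parent_indexes, 0 ≤ cp.1 → cp.1 < (predicted_m_hot_vector.length : Int) →
    1 ≤ PySem.List.pyGetD predicted_m_hot_vector cp.1 0 →
    PySem.Raise.InRange predicted_m_hot_vector.length cp.2
instance (child_parent_indexes : List (Int × Int)) (predicted_m_hot_vector : List Int) : Decidable (Pre_constrained_output_with_respect_to_hierarchy_py child_parent_indexes predicted_m_hot_vector) := by unfold Pre_constrained_output_with_respect_to_hierarchy_py; infer_instance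

def pvWitness_constrained_output_with_respect_to_hierarchy_py : (List (Int × Int)) × List Int := ([(1, 0)], [1, 1])

def Spec_constrained_output_with_respect_to_hierarchy_py (child_parent_indexes : List (Int × Int)) (predicted_m_hot_vector : List Int) (out : List Int) : Prop := out = constrained_output_with_respect_to_hierarchy_py_alt child_parent_indexes predicted_m_hot_vector
instance (child_parent_indexes : List (Int × Int)) (predicted_m_hot_vector : List Int) (out : List Int) : Decidable (Spec_constrained_output_with_respect_to_hierarchy_py child_parent_indexes predicted_m_hot_vector out) := by unfold Spec_constrained_output_with_respect_to_hierarchy_py; infer_instance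

-- ===== CLAIM (what is proved, stated in full; the proofs are below) =====
def Claim_equal_constrained_output_with_respect_to_hierarchy_py : Prop := ∀ (child_parent_indexes : List (Int × Int)) (predicted_m_hot_vector : List Int), Dom_constrained_output_with_respect_to_hierarchy_py child_parent_indexes predicted_m_hot_vector → Pre_constrained_output_with_respect_to_hierarchy_py child_parent_indexes predicted_m_hot_vector → Spec_constrained_output_with_respect_to_hierarchy_py child_parent_indexes predicted_m_hot_vector (constrained_output_with_respect_to_hierarchy_py child_parent_indexes predicted_m_hot_vector)

-- ===== LEMMAS AND PROOFS =====

-- the thresholded value B's first pass stores at index c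
def pvThresh (v : List Int) (c : Int) : Int := if 1 ≤ PySem.List.pyGetD v c 0 then 1 else 0

-- A's per-index decision, as one boolean
def pvCondA (cpi : List (Int × Int)) (v : List Int) (j : Nat) : Bool :=
  decide (1 ≤ PySem.List.pyGetD v (j : Int) 0) &&
  (if (PySem.Dict.mk cpi).contains (j : Int) then
     decide (1 ≤ PySem.List.pyGetD v ((PySem.Dict.mk cpi).getD (j : Int) 0) 0)
   else true)

-- A's loop: the guard does not read the accumulator, so the fold writes 1 exactly at the
-- in-range indices satisfying the guard and leaves everything else alone.
lemma pv_foldl_setone (c : Nat → Bool) (step : List Int → Nat → List Int)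
    (hstep : ∀ o k, step o k = if c k then o.set k 1 else o) :
    ∀ (L : List Nat) (out : List Int) (j : Nat),
      (L.foldl step out)[j]? =
        if j ∈ L ∧ c j = true ∧ j < out.length then some 1 else out[j]? := by
  intro L
  induction L with
  | nil => intro out j; simp
  | cons k L ih =>
    intro out j
    rw [List.foldl_cons, hstep, ih]
    by_cases hck : c k = true
    · rw [if_pos hck]
      by_cases hjk : j = k
      · subst hjk
        by_cases hjlen : j < out.length
        · by_cases hjL : j ∈ L
          · simp [hjL, hjlen, hck]
          · simp [hjL, hjlen, hck]
        · rw [List.getElem?_set]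
          simp [hjlen]
      · rw [List.getElem?_set_ne (by omega)]
        simp only [List.length_set, List.mem_cons]
        by_cases hjL : j ∈ L <;> simp [hjL, hjk]
    · rw [if_neg hck]
      by_cases hjk : j = k
      · subst hjk; simp [hck]
      · simp [hjk]

-- B's first pass agrees with pvThresh at every nonnegative index (in or out of range)
lemma pv_out0_getD (v : List Int) (c : Int) (hc : 0 ≤ c) :
    PySem.List.pyGetD (v.map (fun x => if 1 ≤ x then (1 : Int) else 0)) c 0 = pvThresh v c := by
  unfold pvThresh
  rw [PySem.List.pyGetD_of_nonneg _ _ hc, PySem.List.pyGetD_of_nonneg _ _ hc]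
  rcases lt_or_ge c.toNat v.length with h | h
  · rw [List.getD_eq_getElem?_getD, List.getElem?_map, List.getD_eq_getElem?_getD,
      List.getElem?_eq_getElem h]
    simp
  · rw [List.getD_eq_getElem?_getD, List.getD_eq_getElem?_getD,
      List.getElem?_eq_none (by simpa using h), List.getElem?_eq_none h]
    simp

-- B's loop: under distinct child keys and an accumulator still holding the thresholded value at
-- every key yet to be processed, the fold writes 0 exactly at the indices owning a pair whose
-- parent reads below threshold, and leaves everything else alone.
lemma pv_foldl_zero (v : List Int) :
    ∀ (L : List (Int × Int)) (out : List Int) (j : Nat),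
      (L.map Prod.fst).Nodup →
      (∀ cp ∈ L, 0 ≤ cp.1 → PySem.List.pyGetD out cp.1 0 = pvThresh v cp.1) →
      out.length = v.length →
      (L.foldl
        (fun out cp =>
          if 0 ≤ cp.1 ∧ cp.1 < (v.length : Int) then
            if PySem.List.pyGetD out cp.1 0 = 1 then
              if PySem.List.pyGetD v cp.2 0 < 1 then PySem.List.pySetD out cp.1 0
              else out
            else out
          else out) out)[j]? =
        if (∃ cp ∈ L, cp.1 = (j : Int) ∧ PySem.List.pyGetD v cp.2 0 < 1) ∧
            pvThresh v j = 1 ∧ j < v.length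
        then some 0 else out[j]? := by
  intro L
  induction L with
  | nil => intro out j _ _ _; simp
  | cons cp L ih =>
    intro out j hnd hinv hlen
    obtain ⟨c, p⟩ := cp
    simp only [List.map_cons, List.nodup_cons] at hnd
    obtain ⟨hcL, hndL⟩ := hnd
    rw [List.foldl_cons]
    by_cases hg : (0 ≤ c ∧ c < (v.length : Int))
    · have hinvc : PySem.List.pyGetD out c 0 = pvThresh v c :=
        hinv (c, p) (by simp) hg.1
      by_cases hth : PySem.List.pyGetD out c 0 = 1
      · by_cases hpar : PySem.List.pyGetD v p 0 < 1
        · -- the step fires: zero out index c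
          have hinv' : ∀ cp' ∈ L, 0 ≤ cp'.1 →
              PySem.List.pyGetD (out.set c.toNat 0) cp'.1 0 = pvThresh v cp'.1 := by
            intro cp' hcp' hpos
            have hne : cp'.1 ≠ c := fun h => hcL (h ▸ List.mem_map_of_mem hcp')
            have h0 := hinv cp' (List.mem_cons_of_mem _ hcp') hpos
            rw [PySem.List.pyGetD_of_nonneg _ _ hpos] at h0 ⊢
            rw [List.getD_eq_getElem?_getD, List.getElem?_set_ne (by omega),
              ← List.getD_eq_getElem?_getD]
            exact h0
          rw [if_pos hg, if_pos hth, if_pos hpar,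
            PySem.List.pySetD_of_nonneg out 0 hg.1,
            ih (out.set c.toNat 0) j hndL hinv' (by simp [hlen])]
          by_cases hjc : (j : Int) = c
          · have hjc' : j = c.toNat := by omega
            have hjv : j < v.length := by omega
            have hnotL : ¬ ∃ cp' ∈ L, cp'.1 = (j : Int) ∧ PySem.List.pyGetD v cp'.2 0 < 1 := by
              rintro ⟨cp', hmem, hc', -⟩
              have hcc : cp'.1 = c := by rw [hc', hjc]
              exact hcL (hcc ▸ List.mem_map_of_mem hmem)
            have hthj : pvThresh v j = 1 := by
              rw [← hjc] at hinvc hth; rw [← hinvc]; exact hth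
            rw [if_neg (by rintro ⟨h1, -⟩; exact hnotL h1)]
            rw [if_pos ⟨⟨(c, p), List.mem_cons_self, hjc.symm, hpar⟩, hthj, hjv⟩]
            rw [hjc', List.getElem?_set_self (by omega)]
          · rw [List.getElem?_set_ne (by omega)]
            refine if_congr ⟨?_, ?_⟩ rfl rfl
            · rintro ⟨⟨cp', hmem, hprop⟩, h2, h3⟩
              exact ⟨⟨cp', List.mem_cons_of_mem _ hmem, hprop⟩, h2, h3⟩
            · rintro ⟨⟨cp', hmem, hprop⟩, h2, h3⟩
              rcases List.mem_cons.mp hmem with hhd | hmem'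
              · exact absurd (show ((j : Int)) = c by rw [← hprop.1, hhd]) hjc
              · exact ⟨⟨cp', hmem', hprop⟩, h2, h3⟩
        · -- parent above threshold: step is the identity; this pair never justifies a zero
          rw [if_pos hg, if_pos hth, if_neg hpar,
            ih out j hndL (fun cp' h h' => hinv cp' (List.mem_cons_of_mem _ h) h') hlen]
          refine if_congr ⟨?_, ?_⟩ rfl rfl
          · rintro ⟨⟨cp', hmem, hprop⟩, h2, h3⟩
            exact ⟨⟨cp', List.mem_cons_of_mem _ hmem, hprop⟩, h2, h3⟩
          · rintro ⟨⟨cp', hmem, hprop⟩, h2, h3⟩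
            rcases List.mem_cons.mp hmem with hhd | hmem'
            · rw [hhd] at hprop; exact absurd hprop.2 hpar
            · exact ⟨⟨cp', hmem', hprop⟩, h2, h3⟩
      · -- below threshold at c: step is identity; pvThresh v c ≠ 1 kills the head pair's case
        have hthc : pvThresh v c ≠ 1 := by rw [← hinvc]; exact hth
        rw [if_pos hg, if_neg hth,
          ih out j hndL (fun cp' h h' => hinv cp' (List.mem_cons_of_mem _ h) h') hlen]
        refine if_congr ⟨?_, ?_⟩ rfl rfl
        · rintro ⟨⟨cp', hmem, hprop⟩, h2, h3⟩
          exact ⟨⟨cp', List.mem_cons_of_mem _ hmem, hprop⟩, h2, h3⟩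
        · rintro ⟨⟨cp', hmem, hprop⟩, h2, h3⟩
          rcases List.mem_cons.mp hmem with hhd | hmem'
          · rw [hhd] at hprop
            exact absurd (show pvThresh v c = 1 by rw [show c = (j : Int) from hprop.1]; exact h2) hthc
          · exact ⟨⟨cp', hmem', hprop⟩, h2, h3⟩
    · -- child index out of range: step is identity; the head pair cannot name an index j < n
      rw [if_neg hg,
        ih out j hndL (fun cp' h h' => hinv cp' (List.mem_cons_of_mem _ h) h') hlen]
      refine if_congr ⟨?_, ?_⟩ rfl rfl
      · rintro ⟨⟨cp', hmem, hprop⟩, h2, h3⟩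
        exact ⟨⟨cp', List.mem_cons_of_mem _ hmem, hprop⟩, h2, h3⟩
      · rintro ⟨⟨cp', hmem, hprop⟩, h2, h3⟩
        rcases List.mem_cons.mp hmem with hhd | hmem'
        · rw [hhd] at hprop
          have hc1 : c = (j : Int) := hprop.1
          exact absurd ⟨by omega, by omega⟩ hg
        · exact ⟨⟨cp', hmem', hprop⟩, h2, h3⟩

-- pointwise characterisation of port A
lemma pv_A_char (cpi : List (Int × Int)) (v : List Int) (j : Nat) :
    (constrained_output_with_respect_to_hierarchy_py cpi v)[j]? =
      if j < v.length ∧ pvCondA cpi v j = true then some 1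
      else if j < v.length then some 0 else none := by
  unfold constrained_output_with_respect_to_hierarchy_py
  rw [PySem.List.pyRange_zero_nat, List.foldl_map]
  rw [pv_foldl_setone (pvCondA cpi v) _ ?_ (List.range v.length) _ j]
  · simp only [List.length_map, List.length_range, List.getElem?_map,
      List.mem_range]
    by_cases hj : j < v.length <;> by_cases hc : pvCondA cpi v j = true <;> simp [hj, hc]
  · intro o k
    unfold pvCondA
    split_ifs <;> simp_all <;> omega

-- pointwise characterisation of port B (needs distinct child keys)
lemma pv_B_char (cpi : List (Int × Int)) (v : List Int) (j : Nat)
    (hnd : (cpi.map Prod.fst).Nodup) :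
    (constrained_output_with_respect_to_hierarchy_py_alt cpi v)[j]? =
      if (∃ cp ∈ cpi, cp.1 = (j : Int) ∧ PySem.List.pyGetD v cp.2 0 < 1) ∧
          pvThresh v j = 1 ∧ j < v.length
      then some 0
      else if j < v.length then some (pvThresh v (j : Int)) else none := by
  unfold constrained_output_with_respect_to_hierarchy_py_alt
  rw [pv_foldl_zero v cpi _ j hnd (fun cp _ hp => pv_out0_getD v cp.1 hp) (by simp)]
  refine if_congr Iff.rfl rfl ?_
  by_cases hj : j < v.length
  · rw [List.getElem?_map, List.getElem?_eq_getElem hj, if_pos hj]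
    unfold pvThresh
    rw [PySem.List.pyGetD_of_nonneg _ _ (by omega), List.getD_eq_getElem?_getD,
      List.getElem?_eq_getElem (by simpa using hj)]
    simp
  · rw [List.getElem?_eq_none (by simpa using hj), if_neg hj]

-- ===== VERDICT (by name: the statement is the Claim_ definition above) =====
theorem constrained_output_with_respect_to_hierarchy_py_spec : Claim_equal_constrained_output_with_respect_to_hierarchy_py := by
  intro cpi v _ hpre
  obtain ⟨hnd, -⟩ := hpre
  unfold Spec_constrained_output_with_respect_to_hierarchy_py
  apply List.ext_getElem?
  intro j
  rw [pv_A_char, pv_B_char cpi v j hnd]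
  have hknd : (PySem.Dict.mk cpi).keys.Nodup := by
    simpa [PySem.Dict.keys_mk] using hnd
  by_cases hj : j < v.length
  · by_cases hth : 1 ≤ PySem.List.pyGetD v (j : Int) 0
    · have hth' : 1 ≤ v[j]?.getD 0 := by
        rw [← List.getD_eq_getElem?_getD, ← PySem.List.pyGetD_natCast (d := 0)]; exact hth
      by_cases hex : ∃ p, ((j : Int), p) ∈ cpi
      · obtain ⟨p, hp⟩ := hex
        have hget : (PySem.Dict.mk cpi).get? (j : Int) = some p :=
          (PySem.Dict.get?_eq_some_iff_mem_items _ _ _ hknd).mpr hp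
        have hgetD : (PySem.Dict.mk cpi).getD (j : Int) 0 = p := by
          rw [PySem.Dict.getD_eq_get?_getD, hget]; rfl
        have hcont : (PySem.Dict.mk cpi).contains (j : Int) = true := by
          rw [PySem.Dict.contains_eq_isSome_get?, hget]; rfl
        have huniq : ∀ cp ∈ cpi, cp.1 = (j : Int) → cp.2 = p := by
          rintro ⟨c', p'⟩ hp' hc'
          subst hc'
          have h' := (PySem.Dict.get?_eq_some_iff_mem_items _ _ _ hknd).mpr hp'
          rw [hget] at h'
          exact (Option.some.inj h').symm
        by_cases hpar : PySem.List.pyGetD v p 0 < 1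
        · have hcA : pvCondA cpi v j = false := by
            simp [pvCondA, hcont, hgetD, hth']
            omega
          rw [if_neg (by rintro ⟨-, hc⟩; rw [hcA] at hc; exact Bool.false_ne_true hc),
            if_pos hj,
            if_pos ⟨⟨((j : Int), p), hp, rfl, hpar⟩, by simp [pvThresh, hth'], hj⟩]
        · have hcA : pvCondA cpi v j = true := by
            simp [pvCondA, hcont, hgetD, hth']
            omega
          have hnex : ¬ ∃ cp ∈ cpi, cp.1 = (j : Int) ∧ PySem.List.pyGetD v cp.2 0 < 1 := by
            rintro ⟨cp', hmem, hc', hlt⟩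
            rw [huniq cp' hmem hc'] at hlt
            exact hpar hlt
          rw [if_pos ⟨hj, hcA⟩,
            if_neg (by rintro ⟨h1, -⟩; exact hnex h1), if_pos hj]
          simp [pvThresh, hth']
      · have hcont : (PySem.Dict.mk cpi).contains (j : Int) = false := by
          rw [PySem.Dict.contains_eq_decide_mem_keys, PySem.Dict.keys_mk]
          simp only [decide_eq_false_iff_not, List.mem_map]
          rintro ⟨⟨c, p⟩, hmem, hc⟩
          exact hex ⟨p, by simpa [← hc] using hmem⟩
        have hnex : ¬ ∃ cp ∈ cpi, cp.1 = (j : Int) ∧ PySem.List.pyGetD v cp.2 0 < 1 := by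
          rintro ⟨⟨c', p'⟩, hmem, hc', -⟩
          have hcj : c' = (j : Int) := hc'
          subst hcj
          exact hex ⟨p', hmem⟩
        rw [if_pos ⟨hj, by simp [pvCondA, hth', hcont]⟩,
          if_neg (by rintro ⟨h1, -⟩; exact hnex h1), if_pos hj]
        simp [pvThresh, hth']
    · have hth' : ¬ 1 ≤ v[j]?.getD 0 := by
        rw [← List.getD_eq_getElem?_getD, ← PySem.List.pyGetD_natCast (d := 0)]; exact hth
      rw [if_neg (by rintro ⟨-, hc⟩; simp [pvCondA, hth'] at hc),
        if_pos hj, if_neg (by rintro ⟨-, h2, -⟩; simp [pvThresh, hth'] at h2), if_pos hj]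
      simp [pvThresh, hth']
  · rw [if_neg (by rintro ⟨h, -⟩; exact hj h), if_neg hj,
      if_neg (by rintro ⟨-, -, h⟩; exact hj h), if_neg hj]
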